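-- pv_equiv track=rewrite | github.com/LeanderThiessen/antisymmetrization-circuit | first_quantizationm_vqe.py | sorting_network_bitonic
-- ===== SOURCE A (Python) =====
-- def sorting_network_bitonic(m,dir):
--
--     sn = []
--     def compAndSwap(i,j,dir):
--         sn.append([i,j,dir])
--
--     def bitonic_sort(low, cnt, dir):
--         if cnt>1:
--             k = cnt//2
--             dir_n = (dir + 1) % 2
--             bitonic_sort(low, k, dir_n)#n_dir
--             bitonic_sort(low + k, cnt-k, dir)#dir
--             bitonic_merge(low, cnt, dir)
--
--
--     def bitonic_merge(low, cnt, dir):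
--         if cnt>1:
--             k = greatestPowerOfTwoLessThan(cnt)
--             i = low
--             while i < low+cnt-k:
--                 compAndSwap(i, i+k, dir)
--                 i+=1
--             bitonic_merge(low,k,dir)
--             bitonic_merge(low+k,cnt-k,dir)
--
--     def greatestPowerOfTwoLessThan(cnt):
--         i=1
--         while (2**i)<cnt:
--             i+=1
--         return 2**(i-1)
--
--     bitonic_sort(0,m,dir)
--     L = len(sn)
--     return sn,L
-- ===== SOURCE B (Python) =====
-- def sorting_network_bitonic(m, dir):
--     # Iterative driver: an explicit task stack replaces the two mutually
--     # recursive helpers; comparators are emitted in the same order.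
--     sn = []
--     stack = [("sort", 0, m, dir)]
--     while stack:
--         kind, low, cnt, d = stack.pop()
--         if cnt <= 1:
--             continue
--         if kind == "sort":
--             k = cnt // 2
--             # pushed in reverse execution order: left sort, right sort, merge
--             stack.append(("merge", low, cnt, d))
--             stack.append(("sort", low + k, cnt - k, d))
--             stack.append(("sort", low, k, (d + 1) % 2))
--         else:
--             k = 1
--             while 2 * k < cnt:
--                 k *= 2
--             sn.extend([i, i + k, d] for i in range(low, low + cnt - k))
--             stack.append(("merge", low + k, cnt - k, d))
--             stack.append(("merge", low, k, d))
--     return sn, len(sn)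
-- ===== Notes on version B (the rewrite author's own statement) =====
-- stated objective: alternative
-- what changed: The two mutually recursive helpers (bitonic_sort/bitonic_merge with a closure appending to sn) are replaced by a single iterative driver popping sort/merge tasks from an explicit stack, and the power-of-two search loop (incrementing an exponent) is replaced by a doubling loop.
import Mathlib
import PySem

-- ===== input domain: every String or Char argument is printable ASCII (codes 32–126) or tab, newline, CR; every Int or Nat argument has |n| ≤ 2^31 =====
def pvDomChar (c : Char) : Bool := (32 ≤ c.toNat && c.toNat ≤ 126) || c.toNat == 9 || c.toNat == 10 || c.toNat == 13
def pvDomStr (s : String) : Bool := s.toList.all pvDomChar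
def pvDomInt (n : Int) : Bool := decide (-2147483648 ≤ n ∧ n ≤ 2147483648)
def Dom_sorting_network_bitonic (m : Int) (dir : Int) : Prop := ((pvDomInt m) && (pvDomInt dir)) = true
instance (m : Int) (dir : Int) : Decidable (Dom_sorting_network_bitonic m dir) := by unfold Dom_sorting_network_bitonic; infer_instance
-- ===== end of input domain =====

-- B replaces A's two mutually recursive helpers by one explicit stack-based driver
-- (same comparator list, same order); objective: alternative decomposition, not speed.

-- ===== PORT A =====

-- greatestPowerOfTwoLessThan's while loop; the loop counter i starts at 1 and only
-- increments, so it is carried as a Nat (2**i is Python's exact power).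
theorem pvGpDec (cnt : Int) (i : Nat) (h : (2:Int)^i < cnt) :
    (cnt - (2:Int)^(i+1)).toNat < (cnt - (2:Int)^i).toNat :=
  (Int.toNat_lt_toNat (Int.sub_pos.mpr h)).mpr
    (sub_lt_sub_left (pow_lt_pow_right₀ one_lt_two (lt_add_one i)) cnt)

def pvGpLoop (cnt : Int) (i : Nat) : Int :=
  if _h : (2:Int)^i < cnt then pvGpLoop cnt (i+1) else (2:Int)^(i-1)
termination_by (cnt - (2:Int)^i).toNat
decreasing_by exact pvGpDec cnt i _h

def pvGreatestPowerOfTwoLessThan (cnt : Int) : Int := pvGpLoop cnt 1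

-- the while loop of bitonic_merge: appends [i, i+k, dir] for i = low .. low+cnt-k-1
theorem pvMergeDec (low cnt k i : Int) (h : i < low + cnt - k) :
    (low + cnt - k - (i + 1)).toNat < (low + cnt - k - i).toNat :=
  (Int.toNat_lt_toNat (Int.sub_pos.mpr h)).mpr (sub_lt_sub_left (lt_add_one i) _)

def pvMergeLoop (low cnt dir k i : Int) (sn : List (List Int)) : List (List Int) :=
  if _h : i < low + cnt - k then pvMergeLoop low cnt dir k (i+1) (sn ++ [[i, i+k, dir]]) else sn
termination_by (low + cnt - k - i).toNat
decreasing_by exact pvMergeDec low cnt k i _h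

-- bounds on greatestPowerOfTwoLessThan, needed for the mutual recursion's termination
theorem pvGpLoop_bounds (cnt : Int) (i : Nat) (hi : 1 ≤ i) (h : (2:Int)^(i-1) < cnt) :
    1 ≤ pvGpLoop cnt i ∧ pvGpLoop cnt i < cnt := by
  fun_induction pvGpLoop cnt i with
  | case1 i hlt ih =>
      exact ih (by omega) (by simpa using hlt)
  | case2 i hlt =>
      exact ⟨one_le_pow₀ (by norm_num), h⟩

theorem pvTwo_le (cnt : Int) (h : cnt > 1) : (2:Int) ≤ cnt :=
  (one_add_one_eq_two : (1:Int)+1 = 2) ▸ Int.add_one_le_iff.mpr h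

theorem pvHalfPos (cnt : Int) (h : cnt > 1) : 0 < cnt / 2 :=
  lt_of_lt_of_le one_pos ((Int.le_ediv_iff_mul_le two_pos).mpr ((one_mul (2:Int)) ▸ pvTwo_le cnt h))

theorem pvHalfLtSelf (cnt : Int) (h : cnt > 1) : cnt / 2 < cnt :=
  (Int.ediv_lt_iff_lt_mul two_pos).mpr ((lt_mul_iff_one_lt_right (lt_trans one_pos h)).mpr one_lt_two)

theorem pvHalf_lt (cnt : Int) (h : cnt > 1) : (PySem.Int.floordiv cnt 2).toNat < cnt.toNat := by
  rw [PySem.Int.floordiv_eq_ediv_of_pos two_pos]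
  exact (Int.toNat_lt_toNat (lt_trans one_pos h)).mpr (pvHalfLtSelf cnt h)

theorem pvRest_lt (cnt : Int) (h : cnt > 1) : (cnt - PySem.Int.floordiv cnt 2).toNat < cnt.toNat := by
  rw [PySem.Int.floordiv_eq_ediv_of_pos two_pos]
  exact (Int.toNat_lt_toNat (lt_trans one_pos h)).mpr (sub_lt_self cnt (pvHalfPos cnt h))

theorem pvGp_bounds (cnt : Int) (h : 2 ≤ cnt) :
    1 ≤ pvGreatestPowerOfTwoLessThan cnt ∧ pvGreatestPowerOfTwoLessThan cnt < cnt :=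
  pvGpLoop_bounds cnt 1 le_rfl (by rw [pow_zero]; exact lt_of_lt_of_le one_lt_two h)

theorem pvGpSelf_lt (cnt : Int) (h : cnt > 1) : (pvGreatestPowerOfTwoLessThan cnt).toNat < cnt.toNat :=
  (Int.toNat_lt_toNat (lt_trans one_pos h)).mpr (pvGp_bounds cnt (pvTwo_le cnt h)).2

theorem pvGpRest_lt (cnt : Int) (h : cnt > 1) : (cnt - pvGreatestPowerOfTwoLessThan cnt).toNat < cnt.toNat :=
  (Int.toNat_lt_toNat (lt_trans one_pos h)).mpr
    (sub_lt_self cnt (lt_of_lt_of_le one_pos (pvGp_bounds cnt (pvTwo_le cnt h)).1))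

mutual
def pvBitonicSort (low cnt dir : Int) (sn : List (List Int)) : List (List Int) :=
  if _h : cnt > 1 then
    let k := PySem.Int.floordiv cnt 2
    let dir_n := PySem.Int.mod (dir + 1) 2
    pvBitonicMerge low cnt dir (pvBitonicSort (low + k) (cnt - k) dir (pvBitonicSort low k dir_n sn))
  else sn
termination_by (cnt.toNat, 1)
decreasing_by
  · exact Prod.Lex.left _ _ (pvHalf_lt cnt _h)
  · exact Prod.Lex.left _ _ (pvRest_lt cnt _h)
def pvBitonicMerge (low cnt dir : Int) (sn : List (List Int)) : List (List Int) :=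
  if _h : cnt > 1 then
    let k := pvGreatestPowerOfTwoLessThan cnt
    pvBitonicMerge (low + k) (cnt - k) dir (pvBitonicMerge low k dir (pvMergeLoop low cnt dir k low sn))
  else sn
termination_by (cnt.toNat, 0)
decreasing_by
  · exact Prod.Lex.left _ _ (pvGpSelf_lt cnt _h)
  · exact Prod.Lex.left _ _ (pvGpRest_lt cnt _h)
end

def sorting_network_bitonic (m : Int) (dir : Int) : List (List Int) × Int :=
  let sn := pvBitonicSort 0 m dir []
  (sn, (sn.length : Int))

-- ===== PORT B =====

-- B's doubling loop: k = 1; while 2*k < cnt: k *= 2.  k only doubles from 1, so it is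
-- carried as a positive Nat (the positivity argument is the loop's termination measure).
theorem pvDblDec (cnt : Int) (k : Nat) (hk : 0 < k) (h : 2 * (k:Int) < cnt) :
    cnt.toNat - 2 * k < cnt.toNat - k :=
  Nat.sub_lt_sub_left
    (Int.lt_toNat.mpr (lt_of_le_of_lt
      (by rw [two_mul]; exact le_add_of_nonneg_left (Int.natCast_nonneg k)) h))
    (lt_two_mul_self hk)

def pvDblLoop (cnt : Int) (k : Nat) (hk : 0 < k) : Nat :=
  if _h : 2 * (k:Int) < cnt then pvDblLoop cnt (2*k) (Nat.mul_pos (Nat.succ_pos 1) hk) else k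
termination_by cnt.toNat - k
decreasing_by exact pvDblDec cnt k hk _h

theorem pvDblLoop_pos (cnt : Int) (k : Nat) (hk : 0 < k) : 0 < pvDblLoop cnt k hk := by
  fun_induction pvDblLoop cnt k hk with
  | case1 k hk hlt ih => exact ih
  | case2 k hk hlt => exact hk

theorem pvDblLoop_lt (cnt : Int) (k : Nat) (hk : 0 < k) (h : (k:Int) < cnt) :
    (pvDblLoop cnt k hk : Int) < cnt := by
  fun_induction pvDblLoop cnt k hk with
  | case1 k hk hlt ih => exact ih (by exact_mod_cast hlt)
  | case2 k hk hlt => exact h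

-- weight of one pending task, for the driver's termination measure
def pvTaskW (t : Bool × Int × Int × Int) : Nat :=
  if t.1 then 4 * 3 ^ t.2.2.1.toNat else 3 ^ t.2.2.1.toNat

theorem pvSplit_merge (a b : Nat) (ha : 1 ≤ a) (hb : 1 ≤ b) :
    3^a + 3^b < 3^(a+b) := by
  have h0a : 0 < 3^a := Nat.pow_pos (by norm_num)
  have h0b : 0 < 3^b := Nat.pow_pos (by norm_num)
  rcases Nat.le_total a b with h | h
  · have h1 : 3^a ≤ 3^b := Nat.pow_le_pow_right (by norm_num) h
    have h2 : 3^b * 3 ≤ 3^(a+b) := by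
      rw [← pow_succ]; exact Nat.pow_le_pow_right (by norm_num) (by omega)
    calc 3^a + 3^b ≤ 3^b + 3^b := Nat.add_le_add_right h1 _
      _ = 3^b * 2 := (mul_two _).symm
      _ < 3^b * 3 := (Nat.mul_lt_mul_left h0b).mpr (by norm_num)
      _ ≤ 3^(a+b) := h2
  · have h1 : 3^b ≤ 3^a := Nat.pow_le_pow_right (by norm_num) h
    have h2 : 3^a * 3 ≤ 3^(a+b) := by
      rw [← pow_succ]; exact Nat.pow_le_pow_right (by norm_num) (by omega)
    calc 3^a + 3^b ≤ 3^a + 3^a := Nat.add_le_add_left h1 _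
      _ = 3^a * 2 := (mul_two _).symm
      _ < 3^a * 3 := (Nat.mul_lt_mul_left h0a).mpr (by norm_num)
      _ ≤ 3^(a+b) := h2

theorem pvSplit_sort_half (x y z : Nat) (h1 : x ≤ y) (h0 : 0 < y) (h2 : y * 3 ≤ z) :
    4*x + 4*y + z < 4*z := by
  calc 4*x + 4*y + z ≤ 4*y + 4*y + z := Nat.add_le_add_right (Nat.add_le_add_right (Nat.mul_le_mul_left 4 h1) _) z
    _ = y*8 + z := by ring
    _ < y*9 + z := Nat.add_lt_add_right ((Nat.mul_lt_mul_left h0).mpr (by norm_num)) z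
    _ = (y*3)*3 + z := by ring
    _ ≤ z*3 + z := Nat.add_le_add_right (Nat.mul_le_mul_right 3 h2) z
    _ = 4*z := by ring

theorem pvSplit_sort (a b : Nat) (ha : 1 ≤ a) (hb : 1 ≤ b) :
    4 * 3^a + 4 * 3^b + 3^(a+b) < 4 * 3^(a+b) := by
  have h0a : 0 < 3^a := Nat.pow_pos (by norm_num)
  have h0b : 0 < 3^b := Nat.pow_pos (by norm_num)
  rcases Nat.le_total a b with h | h
  · have h1 : 3^a ≤ 3^b := Nat.pow_le_pow_right (by norm_num) h
    have h2 : 3^b * 3 ≤ 3^(a+b) := by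
      rw [← pow_succ]; exact Nat.pow_le_pow_right (by norm_num) (by omega)
    exact pvSplit_sort_half _ _ _ h1 h0b h2
  · have h1 : 3^b ≤ 3^a := Nat.pow_le_pow_right (by norm_num) h
    have h2 : 3^a * 3 ≤ 3^(a+b) := by
      rw [← pow_succ]; exact Nat.pow_le_pow_right (by norm_num) (by omega)
    calc 4*3^a + 4*3^b + 3^(a+b) = 4*3^b + 4*3^a + 3^(a+b) := by ring
      _ < 4*3^(a+b) := pvSplit_sort_half _ _ _ h1 h0a h2

-- termination of the driver: each popped task is replaced by lighter ones
theorem pvRunBDecPop (t : Bool × Int × Int × Int) (rest : List (Bool × Int × Int × Int)) :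
    (rest.map pvTaskW).sum < ((t :: rest).map pvTaskW).sum := by
  simp only [List.map_cons, List.sum_cons]
  have h : 0 < pvTaskW t := by
    unfold pvTaskW
    split
    · exact Nat.mul_pos (by norm_num) (Nat.pow_pos (by norm_num))
    · exact Nat.pow_pos (by norm_num)
  exact Nat.lt_add_of_pos_left h

theorem pvRunBDecSort (low cnt d d' : Int) (rest : List (Bool × Int × Int × Int)) (h : cnt > 1) :
    (((true, low, PySem.Int.floordiv cnt 2, d')
        :: (true, low + PySem.Int.floordiv cnt 2, cnt - PySem.Int.floordiv cnt 2, d)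
        :: (false, low, cnt, d) :: rest).map pvTaskW).sum
      < (((true, low, cnt, d) :: rest).map pvTaskW).sum := by
  simp only [List.map_cons, List.sum_cons, pvTaskW, Bool.false_eq_true, reduceIte]
  rw [PySem.Int.floordiv_eq_ediv_of_pos two_pos]
  have hnn : (0:Int) ≤ cnt / 2 := le_of_lt (pvHalfPos cnt h)
  have hsub : (0:Int) ≤ cnt - cnt / 2 := Int.sub_nonneg.mpr (le_of_lt (pvHalfLtSelf cnt h))
  have h1 : (cnt / 2).toNat + (cnt - cnt / 2).toNat = cnt.toNat := by
    rw [← Int.toNat_add hnn hsub, add_sub_cancel]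
  have h2 := pvSplit_sort (cnt / 2).toNat (cnt - cnt / 2).toNat
    (Int.lt_toNat.mpr (pvHalfPos cnt h)) (Int.lt_toNat.mpr (Int.sub_pos.mpr (pvHalfLtSelf cnt h)))
  rw [h1] at h2
  have h3 := Nat.add_lt_add_right h2 ((rest.map pvTaskW).sum)
  simp only [Nat.add_assoc] at h3
  exact h3

theorem pvRunBDecMerge (kind : Bool) (low cnt d kk : Int) (rest : List (Bool × Int × Int × Int))
    (_h : cnt > 1) (hk1 : 1 ≤ kk) (hk2 : kk < cnt) :
    (((false, low, kk, d) :: (false, low + kk, cnt - kk, d) :: rest).map pvTaskW).sum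
      < (((kind, low, cnt, d) :: rest).map pvTaskW).sum := by
  simp only [List.map_cons, List.sum_cons, pvTaskW, Bool.false_eq_true, reduceIte]
  have hnn : (0:Int) ≤ kk := le_of_lt (lt_of_lt_of_le one_pos hk1)
  have hsub : (0:Int) ≤ cnt - kk := Int.sub_nonneg.mpr (le_of_lt hk2)
  have h1 : kk.toNat + (cnt - kk).toNat = cnt.toNat := by
    rw [← Int.toNat_add hnn hsub, add_sub_cancel]
  have h2 := pvSplit_merge kk.toNat (cnt - kk).toNat
    (Int.lt_toNat.mpr (lt_of_lt_of_le one_pos hk1)) (Int.lt_toNat.mpr (Int.sub_pos.mpr hk2))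
  rw [h1] at h2
  have h3 : 3 ^ cnt.toNat ≤ (if kind = true then 4 * 3 ^ cnt.toNat else 3 ^ cnt.toNat) := by
    split
    · exact Nat.le_mul_of_pos_left _ (by norm_num)
    · exact le_rfl
  have h4 := Nat.add_lt_add_right h2 ((rest.map pvTaskW).sum)
  simp only [Nat.add_assoc] at h4
  exact lt_of_lt_of_le h4 (Nat.add_le_add_right h3 _)

-- the explicit stack-based driver: pop a task; a sort task pushes (in reverse execution
-- order) its merge and two sub-sorts, a merge task emits its comparators then pushes its
-- two sub-merges.  kind = true means sort, false means merge; top of stack = list head.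
def pvRunB (stack : List (Bool × Int × Int × Int)) (sn : List (List Int)) : List (List Int) :=
  match stack with
  | [] => sn
  | (kind, low, cnt, d) :: rest =>
    if _hc : cnt ≤ 1 then pvRunB rest sn
    else if _hk : kind then
      let k := PySem.Int.floordiv cnt 2
      pvRunB ((true, low, k, PySem.Int.mod (d+1) 2) :: (true, low+k, cnt-k, d) :: (false, low, cnt, d) :: rest) sn
    else
      let k := ((pvDblLoop cnt 1 Nat.one_pos : Nat) : Int)
      pvRunB ((false, low, k, d) :: (false, low+k, cnt-k, d) :: rest)
        (sn ++ (PySem.List.pyRange low (low+cnt-k) 1).map (fun i => [i, i+k, d]))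
termination_by (stack.map pvTaskW).sum
decreasing_by
  · exact pvRunBDecPop _ rest
  · exact _hk ▸ pvRunBDecSort low cnt d (PySem.Int.mod (d+1) 2) rest (not_le.mp _hc)
  · exact pvRunBDecMerge kind low cnt d _ rest (not_le.mp _hc)
      (by exact_mod_cast pvDblLoop_pos cnt 1 Nat.one_pos)
      (pvDblLoop_lt cnt 1 Nat.one_pos (by rw [Nat.cast_one]; exact not_le.mp _hc))

def sorting_network_bitonic_alt (m : Int) (dir : Int) : List (List Int) × Int :=
  let sn := pvRunB [(true, 0, m, dir)] []
  (sn, (sn.length : Int))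

-- ===== PRECONDITION & SPEC =====
def Spec_sorting_network_bitonic (m : Int) (dir : Int) (out : List (List Int) × Int) : Prop := out = sorting_network_bitonic_alt m dir
instance (m : Int) (dir : Int) (out : List (List Int) × Int) : Decidable (Spec_sorting_network_bitonic m dir out) := by unfold Spec_sorting_network_bitonic; infer_instance

-- ===== CLAIM (what is proved, stated in full; the proofs are below) =====
def Claim_equal_sorting_network_bitonic : Prop := ∀ (m : Int) (dir : Int), Dom_sorting_network_bitonic m dir → Spec_sorting_network_bitonic m dir (sorting_network_bitonic m dir)

-- ===== LEMMAS AND PROOFS =====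

-- A's emission while-loop produces exactly B's range comprehension
theorem pvMergeLoop_eq (low cnt dir k i : Int) (sn : List (List Int)) :
    pvMergeLoop low cnt dir k i sn
      = sn ++ (PySem.List.pyRange i (low+cnt-k) 1).map (fun j => [j, j+k, dir]) := by
  fun_induction pvMergeLoop low cnt dir k i sn with
  | case1 i sn hlt ih =>
      rw [ih, PySem.List.pyRange_one_cons hlt]
      simp
  | case2 i sn hlt =>
      have : PySem.List.pyRange i (low+cnt-k) 1 = [] := by
        simp [PySem.List.pyRange_one]; omega
      simp [this]

theorem pvDblLoop_congr (cnt : Int) (k1 k2 : Nat) (h1 : 0 < k1) (h2 : 0 < k2) (h : k1 = k2) :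
    pvDblLoop cnt k1 h1 = pvDblLoop cnt k2 h2 := by subst h; rfl

-- A's power loop and B's doubling loop compute the same power of two
theorem pvGpLoop_eq_dbl (cnt : Int) (i : Nat) (hi : 1 ≤ i) :
    pvGpLoop cnt i = ((pvDblLoop cnt (2^(i-1)) (pow_pos (by norm_num) _) : Nat) : Int) := by
  fun_induction pvGpLoop cnt i with
  | case1 i hlt ih =>
      have hi1 : i - 1 + 1 = i := by omega
      have hpow : (2:Nat)^i = 2 * 2^(i-1) := by
        conv_lhs => rw [← hi1, pow_succ]
        ring
      rw [pvDblLoop]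
      have hcond : 2 * ((2^(i-1) : Nat) : Int) < cnt := by
        push_cast
        calc 2 * (2:Int)^(i-1) = 2^(i-1+1) := by rw [pow_succ]; ring
        _ = 2^i := by rw [hi1]
        _ < cnt := hlt
      rw [dif_pos hcond, ih (by omega)]
      congr 1
      apply pvDblLoop_congr
      rw [Nat.add_sub_cancel, hpow]
  | case2 i hlt =>
      rw [pvDblLoop]
      have hcond : ¬ (2 * ((2^(i-1) : Nat) : Int) < cnt) := by
        push_cast
        intro hc
        apply hlt
        calc (2:Int)^i = 2^(i-1+1) := by rw [Nat.sub_add_cancel hi]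
        _ = 2 * 2^(i-1) := by rw [pow_succ]; ring
        _ < cnt := hc
      rw [dif_neg hcond]
      push_cast
      rfl

theorem pvGp_eq_dbl (cnt : Int) :
    pvGreatestPowerOfTwoLessThan cnt = ((pvDblLoop cnt 1 Nat.one_pos : Nat) : Int) := by
  have := pvGpLoop_eq_dbl cnt 1 le_rfl
  simpa [pvGreatestPowerOfTwoLessThan] using this

theorem pvBM_unfold (low cnt d : Int) (sn : List (List Int)) (h : cnt > 1) :
    pvBitonicMerge low cnt d sn
      = pvBitonicMerge (low + pvGreatestPowerOfTwoLessThan cnt) (cnt - pvGreatestPowerOfTwoLessThan cnt) d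
          (pvBitonicMerge low (pvGreatestPowerOfTwoLessThan cnt) d
            (pvMergeLoop low cnt d (pvGreatestPowerOfTwoLessThan cnt) low sn)) := by
  rw [pvBitonicMerge, dif_pos h]

theorem pvBS_unfold (low cnt d : Int) (sn : List (List Int)) (h : cnt > 1) :
    pvBitonicSort low cnt d sn
      = pvBitonicMerge low cnt d
          (pvBitonicSort (low + PySem.Int.floordiv cnt 2) (cnt - PySem.Int.floordiv cnt 2) d
            (pvBitonicSort low (PySem.Int.floordiv cnt 2) (PySem.Int.mod (d + 1) 2) sn)) := by
  rw [pvBitonicSort, dif_pos h]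

-- running the driver on a merge task equals A's recursive bitonic_merge
theorem pvRunB_merge (n : Nat) : ∀ (cnt low d : Int) (rest : List (Bool × Int × Int × Int))
    (sn : List (List Int)), cnt.toNat ≤ n →
    pvRunB ((false, low, cnt, d) :: rest) sn = pvRunB rest (pvBitonicMerge low cnt d sn) := by
  induction n with
  | zero =>
      intro cnt low d rest sn hn
      rw [pvRunB, dif_pos (show cnt ≤ 1 by omega), pvBitonicMerge,
        dif_neg (show ¬ cnt > 1 by omega)]
  | succ n ih =>
      intro cnt low d rest sn hn
      by_cases h : cnt > 1
      · rw [pvRunB, dif_neg (show ¬ cnt ≤ 1 by omega), dif_neg Bool.false_ne_true]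
        have hp := pvDblLoop_pos cnt 1 (by omega)
        have hl := pvDblLoop_lt cnt 1 (by omega) (by omega)
        set k : Int := ((pvDblLoop cnt 1 Nat.one_pos : Nat) : Int) with hkdef
        rw [ih k low d _ _ (by omega), ih (cnt - k) (low + k) d rest _ (by omega)]
        rw [pvBM_unfold low cnt d sn h, pvMergeLoop_eq, pvGp_eq_dbl]
      · rw [pvRunB, dif_pos (show cnt ≤ 1 by omega), pvBitonicMerge, dif_neg h]

-- running the driver on a sort task equals A's recursive bitonic_sort
theorem pvRunB_sort (n : Nat) : ∀ (cnt low d : Int) (rest : List (Bool × Int × Int × Int))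
    (sn : List (List Int)), cnt.toNat ≤ n →
    pvRunB ((true, low, cnt, d) :: rest) sn = pvRunB rest (pvBitonicSort low cnt d sn) := by
  induction n with
  | zero =>
      intro cnt low d rest sn hn
      rw [pvRunB, dif_pos (show cnt ≤ 1 by omega), pvBitonicSort,
        dif_neg (show ¬ cnt > 1 by omega)]
  | succ n ih =>
      intro cnt low d rest sn hn
      by_cases h : cnt > 1
      · rw [pvRunB, dif_neg (show ¬ cnt ≤ 1 by omega), dif_pos rfl]
        have hk : PySem.Int.floordiv cnt 2 = cnt / 2 := PySem.Int.floordiv_eq_ediv_of_pos (by norm_num)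
        set k : Int := PySem.Int.floordiv cnt 2 with hkdef
        rw [ih k low _ _ _ (by omega), ih (cnt - k) (low + k) d _ _ (by omega)]
        rw [pvRunB_merge (n+1) cnt low d rest _ (by omega)]
        rw [pvBS_unfold low cnt d sn h]
      · rw [pvRunB, dif_pos (show cnt ≤ 1 by omega), pvBitonicSort, dif_neg h]

-- ===== VERDICT (by name: the statement is the Claim_ definition above) =====
theorem sorting_network_bitonic_spec : Claim_equal_sorting_network_bitonic := by
  intro m dir _
  unfold Spec_sorting_network_bitonic sorting_network_bitonic sorting_network_bitonic_alt
  rw [pvRunB_sort m.toNat m 0 dir [] [] le_rfl, pvRunB]
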